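-- pv_equiv track=rewrite | github.com/Mihirshar/Leadership_Chatbot | core/personality_engine.py | get_xp_level
-- ===== SOURCE A (Python) =====
-- def get_xp_level(xp: int) -> tuple[int, str, int]:
--     """Returns (level, title, xp_for_next_level)."""
--     levels = [
--         (0, "Observer"),
--         (100, "Apprentice"),
--         (300, "Strategist"),
--         (600, "Advisor"),
--         (1000, "Visionary"),
--         (1500, "Oracle"),
--     ]
--     current_level = 0
--     current_title = levels[0][1]
--     next_threshold = levels[1][0] if len(levels) > 1 else 9999
--
--     for i, (threshold, title) in enumerate(levels):
--         if xp >= threshold: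
--             current_level = i
--             current_title = title
--             next_threshold = levels[i + 1][0] if i + 1 < len(levels) else threshold + 500
--
--     return current_level, current_title, next_threshold
-- ===== SOURCE B (Python) =====
-- def get_xp_level(xp: int) -> tuple[int, str, int]:
--     """Returns (level, title, xp_for_next_level) via binary search on the threshold table."""
--     thresholds = [0, 100, 300, 600, 1000, 1500]
--     titles = ["Observer", "Apprentice", "Strategist", "Advisor", "Visionary", "Oracle"]
--     lo, hi = 0, len(thresholds)
--     while lo < hi:  # bisect_right
--         mid = (lo + hi) // 2
--         if xp < thresholds[mid]:
--             hi = mid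
--         else:
--             lo = mid + 1
--     idx = max(lo - 1, 0)
--     if idx + 1 < len(thresholds):
--         nxt = thresholds[idx + 1]
--     else:
--         nxt = thresholds[idx] + 500
--     return idx, titles[idx], nxt
-- ===== Notes on version B (the rewrite author's own statement) =====
-- stated objective: alternative
-- what changed: Replaces A's linear scan over the whole level table (updating level/title/threshold at each passed entry) with a single bisect_right binary search on the threshold list, with the index clamped so negative xp stays at the lowest level.
import Mathlib
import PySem

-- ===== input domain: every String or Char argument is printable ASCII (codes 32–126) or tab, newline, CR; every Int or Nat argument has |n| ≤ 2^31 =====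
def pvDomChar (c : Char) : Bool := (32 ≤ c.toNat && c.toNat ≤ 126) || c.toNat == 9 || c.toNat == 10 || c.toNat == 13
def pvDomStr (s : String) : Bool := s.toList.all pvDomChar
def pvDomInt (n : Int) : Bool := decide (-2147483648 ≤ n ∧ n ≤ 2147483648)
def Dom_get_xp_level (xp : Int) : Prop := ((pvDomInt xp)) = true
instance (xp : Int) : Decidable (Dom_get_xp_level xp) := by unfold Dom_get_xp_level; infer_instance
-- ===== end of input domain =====

-- B replaces A's full linear scan of the level table with a single binary-search probe (bisect_right); objective: idiomatic/alternative, same exact results.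

-- ===== PORT A =====
def pvLevelsA : List (Int × String) :=
  [(0, "Observer"), (100, "Apprentice"), (300, "Strategist"),
   (600, "Advisor"), (1000, "Visionary"), (1500, "Oracle")]

def get_xp_level (xp : Int) : Int × String × Int :=
  let levels := pvLevelsA
  -- levels[0][1] / levels[1][0]: the list literal is nonempty, so the .getD default is never used
  let current_level : Int := 0
  let current_title : String := ((PySem.List.pyGet? levels 0).getD (0, "")).2
  let next_threshold : Int :=
    if levels.length > 1 then ((PySem.List.pyGet? levels 1).getD (0, "")).1 else 9999
  (PySem.List.enumerate levels).foldl
    (fun st p =>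
      let i := p.1
      let threshold := p.2.1
      let title := p.2.2
      if xp ≥ threshold then
        (i, title,
          if i + 1 < (levels.length : Int) then ((PySem.List.pyGet? levels (i+1)).getD (0, "")).1
          else threshold + 500)
      else st)
    (current_level, current_title, next_threshold)

-- ===== PORT B =====
def pvThresholds : List Int := [0, 100, 300, 600, 1000, 1500]
def pvTitles : List String :=
  ["Observer", "Apprentice", "Strategist", "Advisor", "Visionary", "Oracle"]

-- the bisect_right while-loop of Source B; indices stay in range so .getD's default is never used
def pvBisect (xp : Int) (lo hi : Nat) : Nat :=
  if lo < hi then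
    let mid := (lo + hi) / 2
    if xp < (PySem.List.pyGet? pvThresholds (mid : Int)).getD 0 then pvBisect xp lo mid
    else pvBisect xp (mid + 1) hi
  else lo
termination_by hi - lo
decreasing_by all_goals omega

def get_xp_level_alt (xp : Int) : Int × String × Int :=
  let lo := pvBisect xp 0 pvThresholds.length
  let idx : Int := max ((lo : Int) - 1) 0
  let nxt : Int :=
    if idx + 1 < (pvThresholds.length : Int) then (PySem.List.pyGet? pvThresholds (idx + 1)).getD 0
    else (PySem.List.pyGet? pvThresholds idx).getD 0 + 500
  (idx, (PySem.List.pyGet? pvTitles idx).getD "", nxt)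

-- ===== PRECONDITION & SPEC =====
def Spec_get_xp_level (xp : Int) (out : Int × String × Int) : Prop := out = get_xp_level_alt xp
instance (xp : Int) (out : Int × String × Int) : Decidable (Spec_get_xp_level xp out) := by unfold Spec_get_xp_level; infer_instance

-- ===== CLAIM (what is proved, stated in full; the proofs are below) =====
def Claim_equal_get_xp_level : Prop := ∀ (xp : Int), Dom_get_xp_level xp → Spec_get_xp_level xp (get_xp_level xp)

-- ===== LEMMAS AND PROOFS =====

-- ===== VERDICT (by name: the statement is the Claim_ definition above) =====
theorem get_xp_level_spec : Claim_equal_get_xp_level := by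
  intro xp _
  unfold Spec_get_xp_level
  by_cases a0 : xp < 0
  · simp [get_xp_level, get_xp_level_alt, pvBisect, pvLevelsA, pvThresholds, pvTitles,
        PySem.List.enumerate, PySem.List.pyGet?, PySem.List.pyIdx?,
        show xp < 0 from by omega, show ¬ xp ≥ 0 from by omega, show xp < 100 from by omega, show ¬ xp ≥ 100 from by omega, show xp < 300 from by omega, show ¬ xp ≥ 300 from by omega, show xp < 600 from by omega, show ¬ xp ≥ 600 from by omega, show xp < 1000 from by omega, show ¬ xp ≥ 1000 from by omega, show xp < 1500 from by omega, show ¬ xp ≥ 1500 from by omega]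
  by_cases a1 : xp < 100
  · simp [get_xp_level, get_xp_level_alt, pvBisect, pvLevelsA, pvThresholds, pvTitles,
        PySem.List.enumerate, PySem.List.pyGet?, PySem.List.pyIdx?,
        show ¬ xp < 0 from by omega, show xp ≥ 0 from by omega, show xp < 100 from by omega, show ¬ xp ≥ 100 from by omega, show xp < 300 from by omega, show ¬ xp ≥ 300 from by omega, show xp < 600 from by omega, show ¬ xp ≥ 600 from by omega, show xp < 1000 from by omega, show ¬ xp ≥ 1000 from by omega, show xp < 1500 from by omega, show ¬ xp ≥ 1500 from by omega]
  by_cases a2 : xp < 300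
  · simp [get_xp_level, get_xp_level_alt, pvBisect, pvLevelsA, pvThresholds, pvTitles,
        PySem.List.enumerate, PySem.List.pyGet?, PySem.List.pyIdx?,
        show ¬ xp < 0 from by omega, show xp ≥ 0 from by omega, show ¬ xp < 100 from by omega, show xp ≥ 100 from by omega, show xp < 300 from by omega, show ¬ xp ≥ 300 from by omega, show xp < 600 from by omega, show ¬ xp ≥ 600 from by omega, show xp < 1000 from by omega, show ¬ xp ≥ 1000 from by omega, show xp < 1500 from by omega, show ¬ xp ≥ 1500 from by omega]
  by_cases a3 : xp < 600
  · simp [get_xp_level, get_xp_level_alt, pvBisect, pvLevelsA, pvThresholds, pvTitles,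
        PySem.List.enumerate, PySem.List.pyGet?, PySem.List.pyIdx?,
        show ¬ xp < 0 from by omega, show xp ≥ 0 from by omega, show ¬ xp < 100 from by omega, show xp ≥ 100 from by omega, show ¬ xp < 300 from by omega, show xp ≥ 300 from by omega, show xp < 600 from by omega, show ¬ xp ≥ 600 from by omega, show xp < 1000 from by omega, show ¬ xp ≥ 1000 from by omega, show xp < 1500 from by omega, show ¬ xp ≥ 1500 from by omega]
  by_cases a4 : xp < 1000
  · simp [get_xp_level, get_xp_level_alt, pvBisect, pvLevelsA, pvThresholds, pvTitles,
        PySem.List.enumerate, PySem.List.pyGet?, PySem.List.pyIdx?,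
        show ¬ xp < 0 from by omega, show xp ≥ 0 from by omega, show ¬ xp < 100 from by omega, show xp ≥ 100 from by omega, show ¬ xp < 300 from by omega, show xp ≥ 300 from by omega, show ¬ xp < 600 from by omega, show xp ≥ 600 from by omega, show xp < 1000 from by omega, show ¬ xp ≥ 1000 from by omega, show xp < 1500 from by omega, show ¬ xp ≥ 1500 from by omega]
  by_cases a5 : xp < 1500
  · simp [get_xp_level, get_xp_level_alt, pvBisect, pvLevelsA, pvThresholds, pvTitles,
        PySem.List.enumerate, PySem.List.pyGet?, PySem.List.pyIdx?,
        show ¬ xp < 0 from by omega, show xp ≥ 0 from by omega, show ¬ xp < 100 from by omega, show xp ≥ 100 from by omega, show ¬ xp < 300 from by omega, show xp ≥ 300 from by omega, show ¬ xp < 600 from by omega, show xp ≥ 600 from by omega, show ¬ xp < 1000 from by omega, show xp ≥ 1000 from by omega, show xp < 1500 from by omega, show ¬ xp ≥ 1500 from by omega]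
  simp [get_xp_level, get_xp_level_alt, pvBisect, pvLevelsA, pvThresholds, pvTitles,
        PySem.List.enumerate, PySem.List.pyGet?, PySem.List.pyIdx?,
        show ¬ xp < 0 from by omega, show xp ≥ 0 from by omega, show ¬ xp < 100 from by omega, show xp ≥ 100 from by omega, show ¬ xp < 300 from by omega, show xp ≥ 300 from by omega, show ¬ xp < 600 from by omega, show xp ≥ 600 from by omega, show ¬ xp < 1000 from by omega, show xp ≥ 1000 from by omega, show ¬ xp < 1500 from by omega, show xp ≥ 1500 from by omega]
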